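-- pv_equiv track=rewrite | github.com/amhunter/HBSold | bcit-summer23-work-main/revision/utils.py | expand_belief
-- ===== SOURCE A (Python) =====
-- def expand_belief(belief_a, belief_b):
--     belief_a_params = belief_a[0].keys()
--     belief_b_params = belief_b[0].keys()
--     new_params = list(set(belief_b_params).difference(belief_a_params))
--     new_belief_a = []
--     for state in belief_a:
--         new_states = [state]
--         for param in new_params:
--             new_new_states = []
--             for item in new_states:
--                 item_false = item.copy()
--                 item_false.update({param: False})
--                 new_new_states.append(item_false)
--                 item_true = item.copy()
--                 item_true.update({param: True})
--                 new_new_states.append(item_true)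
--             new_states = new_new_states
--         new_belief_a.extend(new_states)
--     return new_belief_a
-- ===== SOURCE B (Python) =====
-- def expand_belief(belief_a, belief_b):
--     new_params = list(set(belief_b[0].keys()).difference(belief_a[0].keys()))
--     k = len(new_params)
--     result = []
--     for state in belief_a:
--         for bits in range(1 << k):
--             new_state = state.copy()
--             m = k
--             for param in new_params:
--                 m -= 1
--                 new_state[param] = bool((bits >> m) & 1)
--             result.append(new_state)
--     return result
-- ===== Notes on version B (the rewrite author's own statement) =====
-- stated objective: alternative
-- what changed: Instead of repeatedly doubling a working list of states once per new parameter, B enumerates the 2^k truth assignments directly as the binary digits of a counter (bit k-1-j of the counter is the j-th new parameter's value) and builds each expanded state in one pass; Pre_ only excludes empty belief_a/belief_b, on which A raises IndexError.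
import Mathlib
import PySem

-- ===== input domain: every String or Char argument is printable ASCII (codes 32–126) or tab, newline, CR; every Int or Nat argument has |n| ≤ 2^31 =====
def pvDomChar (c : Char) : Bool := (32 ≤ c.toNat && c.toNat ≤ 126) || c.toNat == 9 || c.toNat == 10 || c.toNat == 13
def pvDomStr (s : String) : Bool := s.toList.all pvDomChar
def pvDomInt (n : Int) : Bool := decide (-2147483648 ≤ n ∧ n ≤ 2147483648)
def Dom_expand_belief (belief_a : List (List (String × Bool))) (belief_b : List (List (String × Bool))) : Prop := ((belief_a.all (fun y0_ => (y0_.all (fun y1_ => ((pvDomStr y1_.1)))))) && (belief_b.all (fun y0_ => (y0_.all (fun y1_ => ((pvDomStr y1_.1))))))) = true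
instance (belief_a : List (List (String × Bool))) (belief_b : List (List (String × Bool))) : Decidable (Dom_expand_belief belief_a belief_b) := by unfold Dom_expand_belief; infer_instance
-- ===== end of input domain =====

-- B replaces A's repeated list-doubling over the new parameters by direct enumeration of the
-- 2^k truth assignments as the binary digits of a counter (alternative decomposition, same cost).


-- ===== PORT A =====
-- Python's iteration order of set(...).difference(...) is interpreter-internal; the port fixes the
-- deterministic first-insertion order for new_params (results are compared as sets of dicts).
-- belief_a[0]/belief_b[0] raise IndexError on empty input: Pre_ excludes that; headD [] only totalises.
def expand_belief (belief_a : List (List (String × Bool))) (belief_b : List (List (String × Bool))) : List (List (String × Bool)) :=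
  let belief_a_params := (PySem.Dict.ofList (belief_a.headD [])).keys
  let belief_b_params := (PySem.Dict.ofList (belief_b.headD [])).keys
  let new_params := PySem.Set.diff (PySem.Set.ofList belief_b_params) belief_a_params
  belief_a.foldl (fun new_belief_a state =>
    let new_states := new_params.foldl (fun new_states param =>
        new_states.foldl (fun new_new_states item =>
          new_new_states ++ [PySem.Dict.insert item param false, PySem.Dict.insert item param true]) [])
      [PySem.Dict.ofList state]
    new_belief_a ++ new_states.map PySem.Dict.items) []

-- ===== PORT B =====
-- 'bool((bits >> m) & 1)' is Nat.testBit bits m (exact); same fixed new_params order as port A.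
def expand_belief_alt (belief_a : List (List (String × Bool))) (belief_b : List (List (String × Bool))) : List (List (String × Bool)) :=
  let new_params := PySem.Set.diff
    (PySem.Set.ofList (PySem.Dict.ofList (belief_b.headD [])).keys)
    (PySem.Dict.ofList (belief_a.headD [])).keys
  let k := new_params.length
  belief_a.foldl (fun result state =>
    (List.range (2 ^ k)).foldl (fun result bits =>
      let new_state := (new_params.foldl
          (fun (dm : PySem.Dict String Bool × Nat) param =>
            (dm.1.insert param (Nat.testBit bits (dm.2 - 1)), dm.2 - 1))
          (PySem.Dict.ofList state, k)).1
      result ++ [new_state.items]) result) []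

-- ===== PRECONDITION & SPEC =====
-- Pre_ excludes exactly the inputs where Python A raises IndexError: empty belief_a or belief_b
-- (belief_a[0] / belief_b[0]).
def Pre_expand_belief (belief_a : List (List (String × Bool))) (belief_b : List (List (String × Bool))) : Prop :=
  belief_a ≠ [] ∧ belief_b ≠ []
instance (belief_a : List (List (String × Bool))) (belief_b : List (List (String × Bool))) : Decidable (Pre_expand_belief belief_a belief_b) := by unfold Pre_expand_belief; infer_instance

def pvWitness_expand_belief : (List (List (String × Bool))) × (List (List (String × Bool))) :=
  ([[("x", true)]], [[("y", false), ("z", true)]])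

def Spec_expand_belief (belief_a : List (List (String × Bool))) (belief_b : List (List (String × Bool))) (out : List (List (String × Bool))) : Prop := out = expand_belief_alt belief_a belief_b
instance (belief_a : List (List (String × Bool))) (belief_b : List (List (String × Bool))) (out : List (List (String × Bool))) : Decidable (Spec_expand_belief belief_a belief_b out) := by unfold Spec_expand_belief; infer_instance

-- ===== CLAIM (what is proved, stated in full; the proofs are below) =====
def Claim_equal_expand_belief : Prop := ∀ (belief_a : List (List (String × Bool))) (belief_b : List (List (String × Bool))), Dom_expand_belief belief_a belief_b → Pre_expand_belief belief_a belief_b → Spec_expand_belief belief_a belief_b (expand_belief belief_a belief_b)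

-- ===== LEMMAS AND PROOFS =====

-- A's inner doubling step written as a flatMap.
theorem pv_stepA_flat (ns : List (PySem.Dict String Bool)) (p : String) :
    ns.foldl (fun acc item =>
        acc ++ [PySem.Dict.insert item p false, PySem.Dict.insert item p true]) []
      = ns.flatMap (fun item => [PySem.Dict.insert item p false, PySem.Dict.insert item p true]) := by
  simpa using PySem.List.foldl_append_eq_flatMap
    (fun item => [PySem.Dict.insert item p false, PySem.Dict.insert item p true]) ns []

-- The doubling fold distributes over an appended start list.
theorem pv_double_append (ps : List String) (xs ys : List (PySem.Dict String Bool)) :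
    ps.foldl (fun ns p => ns.flatMap (fun i => [PySem.Dict.insert i p false, PySem.Dict.insert i p true])) (xs ++ ys)
      = ps.foldl (fun ns p => ns.flatMap (fun i => [PySem.Dict.insert i p false, PySem.Dict.insert i p true])) xs
        ++ ps.foldl (fun ns p => ns.flatMap (fun i => [PySem.Dict.insert i p false, PySem.Dict.insert i p true])) ys := by
  induction ps generalizing xs ys with
  | nil => rfl
  | cons p ps ih =>
    simp only [List.foldl_cons, List.flatMap_append]
    exact ih _ _

-- B's inner fold depends on the counter only through its bits below the start position.
theorem pv_fold_testBit_congr (ps : List String) (d : PySem.Dict String Bool) (m : Nat)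
    (b b' : Nat) (hlen : ps.length ≤ m) (h : ∀ i < m, b.testBit i = b'.testBit i) :
    ps.foldl (fun (dm : PySem.Dict String Bool × Nat) p =>
        (dm.1.insert p (Nat.testBit b (dm.2 - 1)), dm.2 - 1)) (d, m)
      = ps.foldl (fun (dm : PySem.Dict String Bool × Nat) p =>
        (dm.1.insert p (Nat.testBit b' (dm.2 - 1)), dm.2 - 1)) (d, m) := by
  induction ps generalizing d m with
  | nil => rfl
  | cons p ps ih =>
    simp only [List.length_cons] at hlen
    have hm : 1 ≤ m := le_trans (Nat.le_add_left 1 ps.length) hlen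
    simp only [List.foldl_cons]
    rw [h (m - 1) (by omega)]
    exact ih _ (m - 1) (by omega) (fun i hi => h i (by omega))

-- Core: A's repeated doubling from a single state equals B's enumeration by counter bits.
theorem pv_double_eq_count (ps : List String) (st : PySem.Dict String Bool) :
    ps.foldl (fun ns p => ns.flatMap (fun i => [PySem.Dict.insert i p false, PySem.Dict.insert i p true])) [st]
      = (List.range (2 ^ ps.length)).map (fun bits =>
          (ps.foldl (fun (dm : PySem.Dict String Bool × Nat) p =>
              (dm.1.insert p (Nat.testBit bits (dm.2 - 1)), dm.2 - 1)) (st, ps.length)).1) := by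
  induction ps generalizing st with
  | nil => simp [List.range_one]
  | cons p ps ih =>
    have hsplit : ([st] : List (PySem.Dict String Bool)).flatMap
        (fun i => [PySem.Dict.insert i p false, PySem.Dict.insert i p true])
        = [PySem.Dict.insert st p false] ++ [PySem.Dict.insert st p true] := by simp
    calc (p :: ps).foldl (fun ns q => ns.flatMap (fun i => [PySem.Dict.insert i q false, PySem.Dict.insert i q true])) [st]
        = ps.foldl (fun ns q => ns.flatMap (fun i => [PySem.Dict.insert i q false, PySem.Dict.insert i q true]))
            ([PySem.Dict.insert st p false] ++ [PySem.Dict.insert st p true]) := by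
          simp only [List.foldl_cons]; rw [hsplit]
      _ = (List.range (2 ^ ps.length)).map (fun bits =>
            (ps.foldl (fun (dm : PySem.Dict String Bool × Nat) q =>
                (dm.1.insert q (Nat.testBit bits (dm.2 - 1)), dm.2 - 1)) (PySem.Dict.insert st p false, ps.length)).1)
          ++ (List.range (2 ^ ps.length)).map (fun bits =>
            (ps.foldl (fun (dm : PySem.Dict String Bool × Nat) q =>
                (dm.1.insert q (Nat.testBit bits (dm.2 - 1)), dm.2 - 1)) (PySem.Dict.insert st p true, ps.length)).1) := by
          rw [pv_double_append]; rw [ih, ih]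
      _ = (List.range (2 ^ (p :: ps).length)).map (fun bits =>
            ((p :: ps).foldl (fun (dm : PySem.Dict String Bool × Nat) q =>
                (dm.1.insert q (Nat.testBit bits (dm.2 - 1)), dm.2 - 1)) (st, (p :: ps).length)).1) := by
          have h2 : 2 ^ (p :: ps).length = 2 ^ ps.length + 2 ^ ps.length := by
            simp only [List.length_cons, pow_succ]; omega
          rw [h2, List.range_add, List.map_append, List.map_map]
          congr 1
          · apply List.map_congr_left
            intro bits hb
            have hblt : bits < 2 ^ ps.length := List.mem_range.mp hb
            simp only [List.foldl_cons, List.length_cons, Nat.add_sub_cancel]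
            rw [Nat.testBit_lt_two_pow hblt]
          · apply List.map_congr_left
            intro bits hb
            have hblt : bits < 2 ^ ps.length := List.mem_range.mp hb
            simp only [Function.comp_apply, List.foldl_cons, List.length_cons, Nat.add_sub_cancel]
            rw [show Nat.testBit (2 ^ ps.length + bits) ps.length = true by
              simp [Nat.testBit_two_pow_add_eq, Nat.testBit_lt_two_pow hblt]]
            rw [pv_fold_testBit_congr ps _ ps.length (2 ^ ps.length + bits) bits le_rfl
              (fun i hi => Nat.testBit_two_pow_add_gt hi bits)]

-- Top level: A's extend-loop over belief_a equals B's append-loop over the counter range.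
theorem pv_top (ps : List String) (belief_a : List (List (String × Bool))) :
    belief_a.foldl (fun new_belief_a state =>
        new_belief_a ++ (ps.foldl (fun new_states param =>
            new_states.foldl (fun new_new_states item =>
              new_new_states ++ [PySem.Dict.insert item param false, PySem.Dict.insert item param true]) [])
          [PySem.Dict.ofList state]).map PySem.Dict.items) []
      = belief_a.foldl (fun result state =>
          (List.range (2 ^ ps.length)).foldl (fun result bits =>
            result ++ [((ps.foldl (fun (dm : PySem.Dict String Bool × Nat) param =>
                (dm.1.insert param (Nat.testBit bits (dm.2 - 1)), dm.2 - 1)) (PySem.Dict.ofList state, ps.length)).1).items]) result) [] := by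
  have hfunB : (fun (result : List (List (String × Bool))) (state : List (String × Bool)) =>
        (List.range (2 ^ ps.length)).foldl (fun result bits =>
          result ++ [((ps.foldl (fun (dm : PySem.Dict String Bool × Nat) param =>
              (dm.1.insert param (Nat.testBit bits (dm.2 - 1)), dm.2 - 1)) (PySem.Dict.ofList state, ps.length)).1).items]) result)
      = (fun result state =>
        result ++ (List.range (2 ^ ps.length)).map (fun bits =>
          ((ps.foldl (fun (dm : PySem.Dict String Bool × Nat) param =>
              (dm.1.insert param (Nat.testBit bits (dm.2 - 1)), dm.2 - 1)) (PySem.Dict.ofList state, ps.length)).1).items)) := by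
    funext result state
    exact PySem.List.foldl_append_singleton_eq_map _ _ _
  have hfunA : (fun (new_states : List (PySem.Dict String Bool)) (param : String) =>
        new_states.foldl (fun new_new_states item =>
          new_new_states ++ [PySem.Dict.insert item param false, PySem.Dict.insert item param true]) [])
      = (fun ns p => ns.flatMap (fun i => [PySem.Dict.insert i p false, PySem.Dict.insert i p true])) := by
    funext ns p
    exact pv_stepA_flat ns p
  rw [hfunB, hfunA]
  rw [PySem.List.foldl_append_eq_flatMap, PySem.List.foldl_append_eq_flatMap]
  simp only [List.nil_append]
  apply List.flatMap_congr
  intro state _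
  rw [pv_double_eq_count, List.map_map]
  rfl

-- ===== VERDICT (by name: the statement is the Claim_ definition above) =====
theorem expand_belief_spec : Claim_equal_expand_belief := by
  intro belief_a belief_b _ _
  simp only [Spec_expand_belief, expand_belief, expand_belief_alt]
  exact pv_top _ belief_a
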